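-- pv_equiv track=rewrite | github.com/CaptAlpha/Leety | maximum-number-of-balls-in-a-box/maximum-number-of-balls-in-a-box.py | countBalls
-- ===== SOURCE A (Python) =====
-- def countBalls(lowLimit: int, highLimit: int) -> int:
--     n = highLimit - lowLimit + 1
--     arr = [0]*(highLimit+1)
--
--     for i in range(lowLimit,highLimit+1):
--         s = list(str(i))
--         m = 0
--         for k in s:
--             m+=int(k)
--         arr[m]+=1
--     return max(arr)
-- ===== SOURCE B (Python) =====
-- def countBalls(lowLimit: int, highLimit: int) -> int:
--     # Digit DP: count integers in [0..N] per digit sum; answer = max over sums of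
--     # count(highLimit) - count(lowLimit-1).  No iteration over the range itself.
--     if lowLimit > highLimit:
--         return 0
--     d = 0
--     t = highLimit
--     while t > 0:
--         d += 1
--         t //= 10
--     S = 9 * d  # every digit sum of a number in [0..highLimit] is <= S
--
--     def countsUpto(N):
--         # counts[s] = how many x in 0..N have digit sum s, for s in 0..S
--         if N < 0:
--             return [0] * (S + 1)
--         q, r = N // 10, N % 10
--         prev = countsUpto(q - 1)
--         dq = 0
--         t = q
--         while t > 0:
--             dq += t % 10
--             t //= 10
--         res = []
--         for s in range(S + 1):
--             c = 0
--             for b in range(10):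
--                 if s - b >= 0:
--                     c += prev[s - b]
--             if dq <= s <= dq + r:
--                 c += 1
--             res.append(c)
--         return res
--
--     hi = countsUpto(highLimit)
--     lo = countsUpto(lowLimit - 1)
--     return max(hi[s] - lo[s] for s in range(S + 1))
-- ===== Notes on version B (the rewrite author's own statement) =====
-- stated objective: faster
-- what changed: A iterates over every integer in [lowLimit, highLimit] summing the digits of its decimal string into a tally array; B never iterates the range: it computes, by a digit-DP recursion over the decimal digits of N (one level per digit), the number of integers in [0..N] having each digit sum, and returns the max over digit sums of count(highLimit)-count(lowLimit-1).
import Mathlib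
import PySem

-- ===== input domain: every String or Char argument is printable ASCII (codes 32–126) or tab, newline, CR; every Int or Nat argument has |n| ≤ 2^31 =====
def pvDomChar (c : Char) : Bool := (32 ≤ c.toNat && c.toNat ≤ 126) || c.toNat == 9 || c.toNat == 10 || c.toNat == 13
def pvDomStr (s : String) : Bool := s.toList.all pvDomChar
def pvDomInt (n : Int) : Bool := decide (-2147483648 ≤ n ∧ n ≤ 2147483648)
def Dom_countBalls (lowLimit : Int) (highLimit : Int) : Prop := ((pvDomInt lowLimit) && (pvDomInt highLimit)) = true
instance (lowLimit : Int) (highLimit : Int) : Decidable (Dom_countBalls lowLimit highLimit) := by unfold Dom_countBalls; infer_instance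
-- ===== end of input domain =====

-- B replaces A's per-integer scan of [lowLimit, highLimit] by a digit-DP that counts, per digit
-- sum, the integers in [0..N] with one recursion level per decimal digit (objective: faster).

-- ===== PORT A =====
-- Python A: tally digit sums (computed from str(i)) of every i in the range into an array
-- indexed by digit sum, then take max(arr).
def countBalls (lowLimit : Int) (highLimit : Int) : Int :=
  let _n := highLimit - lowLimit + 1
  let arr : List Int := PySem.List.pyRepeat [(0 : Int)] (highLimit + 1)
  let arr := (PySem.List.pyRange lowLimit (highLimit + 1) 1).foldl (fun arr i =>
      let s := PySem.Int.toChars i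
      -- m += int(k): int of a one-char string; the ValueError (k = '-', i.e. i < 0) is excluded
      -- by Pre_countBalls, where every k is a decimal digit and ofChars? is always `some`.
      let m := s.foldl (fun m k => m + (PySem.Int.ofChars? [k]).getD 0) 0
      -- arr[m] += 1 (IndexError impossible under Pre_countBalls: m = digitsum(i) ≤ i ≤ highLimit)
      PySem.List.pySetD arr m (PySem.List.pyGetD arr m 0 + 1)) arr
  -- max(arr): the ValueError on an empty arr (highLimit < 0) is excluded by Pre_countBalls
  (PySem.List.max? arr (fun x => x)).getD 0

-- ===== PORT B =====
-- while t > 0: d += 1; t //= 10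
def bDigitCount (t : Int) (d : Int) : Int :=
  if 0 < t then bDigitCount (PySem.Int.floordiv t 10) (d + 1) else d
termination_by t.toNat
decreasing_by
  rw [PySem.Int.floordiv_eq_ediv_of_pos (by norm_num)]; omega

-- while t > 0: dq += t % 10; t //= 10
def bDigitSum (t : Int) (acc : Int) : Int :=
  if 0 < t then bDigitSum (PySem.Int.floordiv t 10) (acc + PySem.Int.mod t 10) else acc
termination_by t.toNat
decreasing_by
  rw [PySem.Int.floordiv_eq_ediv_of_pos (by norm_num)]; omega

-- countsUpto(N): counts[s] = #{x in [0..N] : digitsum x = s} for s in 0..S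
def bCountsUpto (S : Int) (N : Int) : List Int :=
  if _h : N < 0 then
    PySem.List.pyRepeat [(0 : Int)] (S + 1)
  else
    let q := PySem.Int.floordiv N 10
    let r := PySem.Int.mod N 10
    let prev := bCountsUpto S (q - 1)
    let dq := bDigitSum q 0
    (PySem.List.pyRange 0 (S + 1) 1).foldl (fun res s =>
      let c := (PySem.List.pyRange 0 10 1).foldl (fun c b =>
        if s - b ≥ 0 then c + PySem.List.pyGetD prev (s - b) 0 else c) 0
      let c := if dq ≤ s ∧ s ≤ dq + r then c + 1 else c
      res ++ [c]) []
termination_by (N + 1).toNat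
decreasing_by
  rw [PySem.Int.floordiv_eq_ediv_of_pos (by norm_num)]; omega

def countBalls_alt (lowLimit : Int) (highLimit : Int) : Int :=
  if lowLimit > highLimit then 0
  else
    let d := bDigitCount highLimit 0
    let S := 9 * d
    let hi := bCountsUpto S highLimit
    let lo := bCountsUpto S (lowLimit - 1)
    ((PySem.List.max? ((PySem.List.pyRange 0 (S + 1) 1).map
        (fun s => PySem.List.pyGetD hi s 0 - PySem.List.pyGetD lo s 0)) (fun x => x))).getD 0

-- ===== PRECONDITION & SPEC =====
-- Pre_ excludes exactly the inputs where Python A raises: a negative highLimit makes max([])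
-- raise ValueError, and a negative lowLimit makes int('-') raise ValueError.
def Pre_countBalls (lowLimit : Int) (highLimit : Int) : Prop :=
  0 ≤ lowLimit ∧ 0 ≤ highLimit
instance (lowLimit : Int) (highLimit : Int) : Decidable (Pre_countBalls lowLimit highLimit) := by
  unfold Pre_countBalls; infer_instance

def pvWitness_countBalls : Int × Int := (3, 12)

def Spec_countBalls (lowLimit : Int) (highLimit : Int) (out : Int) : Prop := out = countBalls_alt lowLimit highLimit
instance (lowLimit : Int) (highLimit : Int) (out : Int) : Decidable (Spec_countBalls lowLimit highLimit out) := by unfold Spec_countBalls; infer_instance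

-- ===== CLAIM (what is proved, stated in full; the proofs are below) =====
def Claim_equal_countBalls : Prop := ∀ (lowLimit : Int) (highLimit : Int), Dom_countBalls lowLimit highLimit → Pre_countBalls lowLimit highLimit → Spec_countBalls lowLimit highLimit (countBalls lowLimit highLimit)

-- ===== LEMMAS AND PROOFS =====

-- digit sum and decimal digit count on Nat: the yardstick both ports are measured by
def ds (n : Nat) : Nat := if n = 0 then 0 else n % 10 + ds (n / 10)
decreasing_by omega

def dc (n : Nat) : Nat := if n = 0 then 0 else dc (n / 10) + 1
decreasing_by omega

-- #{x < n : digitsum x = s}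
def cnt (n s : Nat) : Nat := (List.range n).countP (fun x => ds x == s)

theorem ds_mul10_add {q b : Nat} (hb : b < 10) : ds (10 * q + b) = ds q + b := by
  rcases Nat.eq_zero_or_pos (10 * q + b) with h0 | h0
  · have hq : q = 0 := by omega
    have hb0 : b = 0 := by omega
    simp [hq, hb0]
  · rw [ds, if_neg (by omega)]
    have h1 : (10 * q + b) % 10 = b := by omega
    have h2 : (10 * q + b) / 10 = q := by omega
    rw [h1, h2]; omega

theorem ds_le_self (n : Nat) : ds n ≤ n := by
  induction n using Nat.strong_induction_on with
  | _ n ih =>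
    rw [ds]
    rcases Nat.eq_zero_or_pos n with h0 | h0
    · simp [h0]
    · rw [if_neg (by omega)]
      have := ih (n / 10) (by omega)
      omega

theorem ds_le_9dc (n : Nat) : ds n ≤ 9 * dc n := by
  induction n using Nat.strong_induction_on with
  | _ n ih =>
    rw [ds, dc]
    rcases Nat.eq_zero_or_pos n with h0 | h0
    · simp [h0]
    · rw [if_neg (by omega), if_neg (by omega)]
      have := ih (n / 10) (by omega)
      omega

theorem dc_mono {m n : Nat} (h : m ≤ n) : dc m ≤ dc n := by
  induction n using Nat.strong_induction_on generalizing m with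
  | _ n ih =>
    conv_lhs => rw [dc]
    conv_rhs => rw [dc]
    rcases Nat.eq_zero_or_pos m with h0 | h0
    · simp [h0]
    · rw [if_neg (by omega), if_neg (by omega)]
      have hh : m / 10 ≤ n / 10 := by omega
      have := ih (n / 10) (by omega) hh
      omega

theorem cnt_mono {m n : Nat} (s : Nat) (h : m ≤ n) : cnt m s ≤ cnt n s := by
  unfold cnt
  rw [show n = m + (n - m) by omega, List.range_add, List.countP_append]
  omega

-- list-sum over a range IS the Finset sum (definitional)
theorem sum_range_list (n : Nat) (f : Nat → Int) :
    ((List.range n).map f).sum = ∑ x ∈ Finset.range n, f x := rfl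

theorem countP_range_eq_sum (n : Nat) (p : Nat → Bool) :
    (List.range n).countP p = ∑ x ∈ Finset.range n, if p x then 1 else 0 := by
  induction n with
  | zero => simp
  | succ n ih => rw [List.range_succ, List.countP_append, Finset.sum_range_succ, ih]; simp [List.countP_cons]

theorem window_count (m a s : Nat) :
    (∑ b ∈ Finset.range m, if a + b = s then 1 else 0) = if a ≤ s ∧ s < a + m then 1 else 0 := by
  induction m with
  | zero => rw [Finset.sum_range_zero, if_neg (by omega)]
  | succ m ih =>
    rw [Finset.sum_range_succ, ih]
    split_ifs <;> omega

theorem countP_shift (q s m : Nat) (hm : m ≤ 10) :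
    ((List.range m).map (fun x => 10 * q + x)).countP (fun x => ds x == s)
      = ∑ b ∈ Finset.range m, if ds q + b = s then 1 else 0 := by
  rw [List.countP_map, countP_range_eq_sum]
  apply Finset.sum_congr rfl
  intro b hb
  simp only [Finset.mem_range] at hb
  simp only [Function.comp_apply, ds_mul10_add (show b < 10 by omega), beq_iff_eq]

theorem cnt_mul10 (q s : Nat) :
    cnt (10 * q) s = ∑ b ∈ Finset.range 10, if b ≤ s then cnt q (s - b) else 0 := by
  have key : cnt (10 * q) s
      = ∑ a ∈ Finset.range q, ∑ b ∈ Finset.range 10, if ds a + b = s then 1 else 0 := by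
    induction q with
    | zero => simp [cnt]
    | succ q ih =>
      have h10 : 10 * (q + 1) = 10 * q + 10 := by ring
      unfold cnt
      rw [h10, List.range_add, List.countP_append]
      unfold cnt at ih
      rw [ih, Finset.sum_range_succ, countP_shift q s 10 (by omega), window_count]
  rw [key, Finset.sum_comm]
  apply Finset.sum_congr rfl
  intro b hb
  by_cases hbs : b ≤ s
  · rw [if_pos hbs]
    unfold cnt
    rw [countP_range_eq_sum]
    apply Finset.sum_congr rfl
    intro a _
    by_cases hh : ds a + b = s
    · rw [if_pos hh, if_pos (by simp only [beq_iff_eq]; omega)]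
    · rw [if_neg hh, if_neg (by simp only [beq_iff_eq]; omega)]
  · rw [if_neg hbs]
    apply Finset.sum_eq_zero
    intro a _
    rw [if_neg (by omega)]

theorem cnt_split (q r s : Nat) (hr : r < 10) :
    cnt (10 * q + r + 1) s
      = (∑ b ∈ Finset.range 10, if b ≤ s then cnt q (s - b) else 0)
        + (if ds q ≤ s ∧ s ≤ ds q + r then 1 else 0) := by
  rw [← cnt_mul10]
  unfold cnt
  have h1 : 10 * q + r + 1 = 10 * q + (r + 1) := by ring
  rw [h1, List.range_add, List.countP_append, countP_shift q s (r + 1) (by omega), window_count]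
  congr 1
  split_ifs <;> omega

-- ---- B-side helpers compute dc / ds ----
theorem bDigitCount_eq_aux (n : Nat) : ∀ (t : Int), t.toNat = n → ∀ d : Int,
    bDigitCount t d = d + (dc t.toNat : Int) := by
  induction n using Nat.strong_induction_on with
  | _ n ih =>
    intro t hn d
    rw [bDigitCount]
    by_cases h : 0 < t
    · rw [if_pos h, PySem.Int.floordiv_eq_ediv_of_pos (by norm_num)]
      have ht : (t / 10).toNat = t.toNat / 10 := by omega
      rw [ih (t / 10).toNat (by omega) (t / 10) rfl (d + 1), ht]
      conv_rhs => rw [dc]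
      rw [if_neg (by omega)]
      push_cast; ring
    · rw [if_neg h]
      have h0 : t.toNat = 0 := by omega
      rw [h0, dc]; simp

theorem bDigitCount_eq (t d : Int) : bDigitCount t d = d + (dc t.toNat : Int) :=
  bDigitCount_eq_aux t.toNat t rfl d

theorem bDigitSum_eq_aux (n : Nat) : ∀ (t : Int), t.toNat = n → ∀ acc : Int,
    bDigitSum t acc = acc + (ds t.toNat : Int) := by
  induction n using Nat.strong_induction_on with
  | _ n ih =>
    intro t hn acc
    rw [bDigitSum]
    by_cases h : 0 < t
    · rw [if_pos h, PySem.Int.floordiv_eq_ediv_of_pos (by norm_num),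
          PySem.Int.mod_eq_emod_of_pos (by norm_num)]
      have ht : (t / 10).toNat = t.toNat / 10 := by omega
      rw [ih (t / 10).toNat (by omega) (t / 10) rfl _, ht]
      conv_rhs => rw [ds]
      rw [if_neg (by omega)]
      have hm : t % 10 = ((t.toNat % 10 : Nat) : Int) := by omega
      rw [hm]; push_cast; ring
    · rw [if_neg h]
      have h0 : t.toNat = 0 := by omega
      rw [h0, ds]; simp

theorem bDigitSum_eq (t acc : Int) : bDigitSum t acc = acc + (ds t.toNat : Int) :=
  bDigitSum_eq_aux t.toNat t rfl acc

-- ---- bCountsUpto computes cnt ----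
theorem inner_eq (prev : List Int) (Sn q k : Nat)
    (hprev : prev = (List.range (Sn + 1)).map (fun s => (cnt q s : Int)))
    (hk : k ≤ Sn) :
    (PySem.List.pyRange 0 10 1).foldl
        (fun c b => if (k : Int) - b ≥ 0 then c + PySem.List.pyGetD prev ((k : Int) - b) 0 else c) 0
      = ∑ b ∈ Finset.range 10, if b ≤ k then (cnt q (k - b) : Int) else 0 := by
  rw [PySem.List.pyRange_one, List.foldl_map, show ((10:Int) - 0).toNat = 10 from rfl]
  have step : ∀ (c : Int) (j : Nat), j ∈ List.range 10 →
      (fun c (j : Nat) => if (k : Int) - (0 + (j : Int)) ≥ 0 then c + PySem.List.pyGetD prev ((k : Int) - (0 + (j : Int))) 0 else c) c j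
      = (fun c (j : Nat) => c + (if j ≤ k then (cnt q (k - j) : Int) else 0)) c j := by
    intro c j hj
    dsimp only
    simp only [List.mem_range] at hj
    by_cases hjk : j ≤ k
    · rw [if_pos (by omega), if_pos hjk]
      have h1 : (k : Int) - (0 + (j : Int)) = ((k - j : Nat) : Int) := by omega
      rw [h1, PySem.List.pyGetD_natCast, hprev, PySem.List.getD_map_range _ _ _ _ (by omega)]
    · rw [if_neg (by omega), if_neg hjk]
      ring
  rw [PySem.List.foldl_congr_mem _ _ _ _ step, PySem.List.foldl_add]
  rw [sum_range_list]
  simp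

theorem natCast_sum_ind (k q : Nat) :
    ((∑ b ∈ Finset.range 10, if b ≤ k then cnt q (k - b) else 0 : Nat) : Int)
      = ∑ b ∈ Finset.range 10, if b ≤ k then (cnt q (k - b) : Int) else 0 := by
  push_cast
  exact Finset.sum_congr rfl fun b _ => by split_ifs <;> simp

theorem bCountsUpto_eq_aux (S : Int) (hS : 0 ≤ S) : ∀ (n : Nat) (N : Int), (N + 1).toNat = n →
    bCountsUpto S N = (List.range (S.toNat + 1)).map (fun s => (cnt (N + 1).toNat s : Int)) := by
  intro n
  induction n using Nat.strong_induction_on with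
  | _ n ih =>
    intro N hn
    rw [bCountsUpto]
    by_cases hneg : N < 0
    · rw [dif_pos hneg, PySem.List.pyRepeat_singleton]
      have h0 : (N + 1).toNat = 0 := by omega
      have hlen : (S + 1).toNat = S.toNat + 1 := by omega
      rw [h0, hlen]
      symm
      rw [List.eq_replicate_iff]
      refine ⟨by simp, ?_⟩
      intro b hb
      simp only [List.mem_map] at hb
      obtain ⟨a, _, hab⟩ := hb
      simp [cnt] at hab
      omega
    · rw [dif_neg hneg]
      have hN : 0 ≤ N := by omega
      have hfd : PySem.Int.floordiv N 10 = N / 10 := PySem.Int.floordiv_eq_ediv_of_pos (by norm_num)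
      have hmd : PySem.Int.mod N 10 = N % 10 := PySem.Int.mod_eq_emod_of_pos (by norm_num)
      simp only [hfd, hmd]
      have hprev : bCountsUpto S (N / 10 - 1)
          = (List.range (S.toNat + 1)).map (fun s => (cnt (N / 10).toNat s : Int)) := by
        have h1 := ih (N / 10 - 1 + 1).toNat (by omega) (N / 10 - 1) rfl
        rw [h1]
        have h2 : (N / 10 - 1 + 1).toNat = (N / 10).toNat := by omega
        rw [h2]
      rw [hprev, bDigitSum_eq, zero_add]
      rw [PySem.List.foldl_append_singleton_eq_map, List.nil_append]
      have hS1 : S + 1 = ((S.toNat + 1 : Nat) : Int) := by omega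
      rw [hS1, PySem.List.pyRange_zero_natCast, List.map_map]
      apply List.map_congr_left
      intro k hk
      simp only [List.mem_range] at hk
      simp only [Function.comp_apply]
      rw [inner_eq ((List.range (S.toNat + 1)).map (fun s => (cnt (N / 10).toNat s : Int)))
            S.toNat (N / 10).toNat k rfl (by omega)]
      have hsplit : (N + 1).toNat = 10 * (N / 10).toNat + (N % 10).toNat + 1 := by omega
      rw [hsplit, cnt_split _ _ _ (by omega)]
      have hr : (N % 10 : Int) = (((N % 10).toNat : Nat) : Int) := by omega
      by_cases hcond : ds (N / 10).toNat ≤ k ∧ k ≤ ds (N / 10).toNat + (N % 10).toNat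
      · rw [if_pos (by constructor <;> [exact_mod_cast Nat.cast_le.mpr hcond.1;
            (rw [hr]; exact_mod_cast Nat.cast_le.mpr hcond.2)]), if_pos hcond]
        push_cast [natCast_sum_ind]
        ring
      · rw [if_neg (by rw [hr]; omega), if_neg hcond]
        push_cast [natCast_sum_ind]
        ring

theorem bCountsUpto_eq (S : Int) (hS : 0 ≤ S) (N : Int) :
    bCountsUpto S N = (List.range (S.toNat + 1)).map (fun s => (cnt (N + 1).toNat s : Int)) :=
  bCountsUpto_eq_aux S hS (N + 1).toNat N rfl

-- ---- A-side: the string digit sum is ds ----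
theorem digitChar_val {d : Nat} (h : d < 10) :
    (PySem.Int.ofChars? [Nat.digitChar d]).getD 0 = (d : Int) := by
  interval_cases d <;> decide

theorem toDigitsCore_sum (fuel : Nat) : ∀ (n : Nat) (l : List Char), n < fuel →
    ((Nat.toDigitsCore 10 fuel n l).map (fun c => (PySem.Int.ofChars? [c]).getD 0)).sum
      = (ds n : Int) + (l.map (fun c => (PySem.Int.ofChars? [c]).getD 0)).sum := by
  induction fuel with
  | zero => intro n l h; omega
  | succ f ih =>
    intro n l h
    rw [Nat.toDigitsCore]
    by_cases h0 : n / 10 = 0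
    · rw [if_pos h0]
      simp only [List.map_cons, List.sum_cons]
      rw [digitChar_val (by omega)]
      have hds : ds n = n % 10 := by
        rw [ds]; rcases Nat.eq_zero_or_pos n with h1 | h1
        · simp [h1]
        · rw [if_neg (by omega), h0, ds]; simp
      rw [hds]
    · rw [if_neg h0]
      have hn : 10 ≤ n := by by_contra hc; exact h0 (by omega)
      rw [ih (n / 10) _ (by omega)]
      simp only [List.map_cons, List.sum_cons]
      rw [digitChar_val (by omega)]
      conv_rhs => rw [ds, if_neg (by omega)]
      push_cast; ring

theorem strDigitSum (i : Int) (h : 0 ≤ i) :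
    (PySem.Int.toChars i).foldl (fun m k => m + (PySem.Int.ofChars? [k]).getD 0) 0
      = (ds i.toNat : Int) := by
  rw [PySem.Int.toChars, if_neg (by omega)]
  rw [PySem.List.foldl_add]
  rw [Nat.toDigits, toDigitsCore_sum (i.toNat + 1) i.toNat [] (by omega)]
  simp

-- ---- A-side: loop invariant ----
theorem map_getD_range_self (l : List Int) :
    (List.range l.length).map (fun s => l.getD s 0) = l := by
  apply List.ext_getElem
  · simp
  · intro i h1 h2
    simp [List.getD_eq_getElem?_getD, List.getElem?_eq_getElem h2]

theorem AInv (f : Int → Int) (hf : ∀ i : Int, 0 ≤ i → f i = ((ds i.toNat : Nat) : Int))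
    (xs : List Int) : ∀ (arr : List Int),
    (∀ i ∈ xs, 0 ≤ i ∧ ds i.toNat < arr.length) →
    xs.foldl (fun arr i => PySem.List.pySetD arr (f i) (PySem.List.pyGetD arr (f i) 0 + 1)) arr
      = (List.range arr.length).map
          (fun s => arr.getD s 0 + (xs.countP (fun i => ds i.toNat == s) : Int)) := by
  induction xs with
  | nil =>
    intro arr _
    simp only [List.foldl_nil, List.countP_nil]
    conv_lhs => rw [← map_getD_range_self arr]
    apply List.map_congr_left
    intro s _
    simp
  | cons i xs ih =>
    intro arr hx
    obtain ⟨hi0, him⟩ := hx i (by simp)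
    rw [List.foldl_cons, hf i hi0, PySem.List.pyGetD_natCast, PySem.List.pySetD_natCast]
    set m := ds i.toNat with hm
    set arr' := arr.set m (arr.getD m 0 + 1) with harr'
    have hlen : arr'.length = arr.length := by simp [harr']
    rw [ih arr' (by rw [hlen]; exact fun j hj => hx j (by simp [hj])), hlen]
    apply List.map_congr_left
    intro s hs
    simp only [List.mem_range] at hs
    have hgd : arr'.getD s 0 = if m = s then arr.getD m 0 + 1 else arr.getD s 0 := by
      rw [harr', List.getD_eq_getElem?_getD, List.getElem?_set]
      by_cases hms : m = s
      · rw [if_pos hms, if_pos (by omega)]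
        simp [← hms, List.getD_eq_getElem?_getD]
      · simp [hms, List.getD_eq_getElem?_getD]
    rw [hgd, List.countP_cons]
    by_cases hms : m = s
    · rw [if_pos hms, if_pos (by simp only [beq_iff_eq]; omega), hms]
      push_cast; ring
    · rw [if_neg hms, if_neg (by simp only [beq_iff_eq]; omega)]
      push_cast; ring

-- ---- max-fold plumbing ----
theorem maxD_of_nonneg (xs : List Int) (hne : xs ≠ []) (hpos : ∀ x ∈ xs, 0 ≤ x) :
    (PySem.List.max? xs (fun x => x)).getD 0 = xs.foldl max 0 := by
  match xs with
  | x :: t =>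
    rw [PySem.List.max?_id_cons, Option.getD_some, List.foldl_cons,
        max_eq_right (hpos x (by simp))]

theorem maxfold_trunc (f : Nat → Int) (K : Nat) : ∀ (K' : Nat), K ≤ K' →
    (∀ k, K ≤ k → f k = 0) →
    ((List.range K').map f).foldl max 0 = ((List.range K).map f).foldl max 0 := by
  intro K'
  induction K' with
  | zero => intro h _; rw [Nat.le_zero.mp h]
  | succ K' ih =>
    intro h hv
    by_cases hK : K = K' + 1
    · rw [hK]
    · rw [List.range_succ, List.map_append, List.foldl_append]
      simp only [List.map_cons, List.map_nil, List.foldl_cons, List.foldl_nil]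
      rw [hv K' (by omega), max_eq_left (PySem.List.le_foldl_max _ _).1, ih (by omega) hv]

-- count of the range [lowLimit, highLimit] with digit sum s, as the difference of two cnt's
theorem countP_pyRange_cnt (n : Nat) (s : Nat) :
    (PySem.List.pyRange 0 (n : Int) 1).countP (fun i => ds i.toNat == s) = cnt n s := by
  rw [PySem.List.pyRange_zero_natCast, List.countP_map]
  unfold cnt
  apply List.countP_congr
  intro a _
  simp

theorem countP_range_split (low high : Int) (hl : 0 ≤ low) (hlh : low ≤ high + 1) (s : Nat) :
    ((PySem.List.pyRange low (high + 1) 1).countP (fun i => ds i.toNat == s) : Int)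
      = (cnt (high + 1).toNat s : Int) - (cnt low.toNat s : Int) := by
  have h1 : PySem.List.pyRange 0 (high + 1) 1
      = PySem.List.pyRange 0 low 1 ++ PySem.List.pyRange low (high + 1) 1 :=
    PySem.List.pyRange_one_append 0 low (high + 1) hl hlh
  have h2 : cnt (high + 1).toNat s
      = cnt low.toNat s + (PySem.List.pyRange low (high + 1) 1).countP (fun i => ds i.toNat == s) := by
    rw [← countP_pyRange_cnt (high + 1).toNat s, ← countP_pyRange_cnt low.toNat s]
    rw [show ((high + 1).toNat : Int) = high + 1 by omega, show ((low.toNat : Nat) : Int) = low by omega]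
    rw [h1, List.countP_append]
  omega

theorem countBalls_spec_core (low high : Int) (hl : 0 ≤ low) (hh : 0 ≤ high) :
    countBalls low high = countBalls_alt low high := by
  -- abbreviations
  set K : Nat := (high + 1).toNat with hK
  have hK1 : 1 ≤ K := by omega
  -- ---- A reduces to a running max over per-digit-sum counts of the range ----
  have hA : countBalls low high
      = ((List.range K).map (fun s =>
          ((PySem.List.pyRange low (high + 1) 1).countP (fun i => ds i.toNat == s) : Int))).foldl max 0 := by
    show ((PySem.List.max?
        ((PySem.List.pyRange low (high + 1) 1).foldl (fun arr i =>
            PySem.List.pySetD arr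
              ((PySem.Int.toChars i).foldl (fun m k => m + (PySem.Int.ofChars? [k]).getD 0) 0)
              (PySem.List.pyGetD arr
                ((PySem.Int.toChars i).foldl (fun m k => m + (PySem.Int.ofChars? [k]).getD 0) 0) 0 + 1))
          (PySem.List.pyRepeat [(0 : Int)] (high + 1))) (fun x => x)).getD 0) = _
    rw [PySem.List.pyRepeat_singleton]
    rw [AInv (fun i => (PySem.Int.toChars i).foldl (fun m k => m + (PySem.Int.ofChars? [k]).getD 0) 0)
          (fun i hi => strDigitSum i hi) _ _ ?side]
    case side =>
      intro i hi
      rw [PySem.List.mem_pyRange_one] at hi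
      refine ⟨by omega, ?_⟩
      rw [List.length_replicate]
      have := ds_le_self i.toNat
      omega
    rw [List.length_replicate, ← hK]
    rw [maxD_of_nonneg _ (by simp; omega) ?pos]
    case pos =>
      intro x hx
      simp only [List.mem_map] at hx
      obtain ⟨a, _, ha⟩ := hx
      have : (0:Int) ≤ (List.replicate K (0:Int)).getD a 0 := by
        simp [List.getD_eq_getElem?_getD, List.getElem?_replicate]
        split <;> simp
      omega
    congr 1
    apply List.map_congr_left
    intro s _
    have : (List.replicate K (0:Int)).getD s 0 = 0 := by
      simp [List.getD_eq_getElem?_getD, List.getElem?_replicate]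
      split <;> simp
    rw [this, zero_add]
  by_cases hcase : low > high
  · -- empty range: A's tallies are all zero, B returns 0 directly
    rw [hA, countBalls_alt, if_pos hcase]
    have hnil : PySem.List.pyRange low (high + 1) 1 = [] :=
      PySem.List.pyRange_one_eq_nil (by omega)
    have hz : ∀ k : Nat, (0:Nat) ≤ k →
        (fun s => ((PySem.List.pyRange low (high + 1) 1).countP (fun i => ds i.toNat == s) : Int)) k = 0 := by
      intro k _
      simp [hnil]
    rw [maxfold_trunc _ 0 K (by omega) hz]
    simp
  · -- nonempty range: both sides are the max over digit sums of the same counts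
    have hlh : low ≤ high + 1 := by omega
    set Sn : Nat := 9 * dc high.toNat with hSn
    set F : Nat → Int := fun s => (cnt (high + 1).toNat s : Int) - (cnt low.toNat s : Int) with hF
    -- A's entries are F
    have hA2 : countBalls low high = ((List.range K).map F).foldl max 0 := by
      rw [hA]
      congr 1
      apply List.map_congr_left
      intro s _
      rw [countP_range_split low high hl hlh s]
    -- B reduces to the same running max over range Sn+1
    have hB : countBalls_alt low high = ((List.range (Sn + 1)).map F).foldl max 0 := by
      rw [countBalls_alt, if_neg hcase]
      show ((PySem.List.max? ((PySem.List.pyRange 0 (9 * bDigitCount high 0 + 1) 1).map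
          (fun s => PySem.List.pyGetD (bCountsUpto (9 * bDigitCount high 0) high) s 0
                  - PySem.List.pyGetD (bCountsUpto (9 * bDigitCount high 0) (low - 1)) s 0)) (fun x => x)).getD 0) = _
      rw [bDigitCount_eq, zero_add]
      have hScast : 9 * ((dc high.toNat : Int)) = ((Sn : Nat) : Int) := by push_cast [hSn]; ring
      rw [hScast]
      have hhi : bCountsUpto ((Sn : Nat) : Int) high
          = (List.range (Sn + 1)).map (fun s => (cnt (high + 1).toNat s : Int)) := by
        rw [bCountsUpto_eq _ (by positivity) high]
        simp only [Int.toNat_natCast]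
      have hlo : bCountsUpto ((Sn : Nat) : Int) (low - 1)
          = (List.range (Sn + 1)).map (fun s => (cnt low.toNat s : Int)) := by
        rw [bCountsUpto_eq _ (by positivity) (low - 1),
            show (low - 1 + 1 : Int) = low from by ring]
        simp only [Int.toNat_natCast]
      rw [hhi, hlo]
      have hS1 : ((Sn : Nat) : Int) + 1 = ((Sn + 1 : Nat) : Int) := by push_cast; ring
      rw [hS1, PySem.List.pyRange_zero_natCast, List.map_map]
      have hmap : ((List.range (Sn + 1)).map
          ((fun s => PySem.List.pyGetD ((List.range (Sn + 1)).map (fun s => (cnt (high + 1).toNat s : Int))) s 0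
                   - PySem.List.pyGetD ((List.range (Sn + 1)).map (fun s => (cnt low.toNat s : Int))) s 0) ∘ (fun k : Nat => (k : Int))))
          = (List.range (Sn + 1)).map F := by
        apply List.map_congr_left
        intro k hk
        simp only [List.mem_range] at hk
        simp only [Function.comp_apply, PySem.List.pyGetD_natCast]
        rw [PySem.List.getD_map_range _ _ _ _ hk, PySem.List.getD_map_range _ _ _ _ hk]
      rw [hmap]
      rw [maxD_of_nonneg _ (by simp) ?posB]
      case posB =>
        intro x hx
        simp only [List.mem_map] at hx
        obtain ⟨a, _, ha⟩ := hx
        have := cnt_mono (m := low.toNat) (n := (high + 1).toNat) a (by omega)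
        rw [hF] at ha
        dsimp only at ha
        omega
    -- vanishing of F beyond each index range
    have hvanA : ∀ k, K ≤ k → F k = 0 := by
      intro k hk
      show (cnt (high + 1).toNat k : Int) - (cnt low.toNat k : Int) = 0
      rw [← countP_range_split low high hl hlh k]
      rw [List.countP_eq_zero.mpr ?van1]
      case van1 =>
        intro i hi
        rw [PySem.List.mem_pyRange_one] at hi
        have h1 := ds_le_self i.toNat
        simp only [beq_iff_eq]
        omega
      rfl
    have hvanB : ∀ k, Sn + 1 ≤ k → F k = 0 := by
      intro k hk
      show (cnt (high + 1).toNat k : Int) - (cnt low.toNat k : Int) = 0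
      rw [← countP_range_split low high hl hlh k]
      rw [List.countP_eq_zero.mpr ?van2]
      case van2 =>
        intro i hi
        rw [PySem.List.mem_pyRange_one] at hi
        have h1 := ds_le_9dc i.toNat
        have h2 := dc_mono (m := i.toNat) (n := high.toNat) (by omega)
        simp only [beq_iff_eq]
        omega
      rfl
    -- both maxes extend to the common upper bound
    rw [hA2, hB]
    rw [← maxfold_trunc F K (max K (Sn + 1)) (by omega) hvanA,
        ← maxfold_trunc F (Sn + 1) (max K (Sn + 1)) (by omega) hvanB]

-- ===== VERDICT (by name: the statement is the Claim_ definition above) =====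
theorem countBalls_spec : Claim_equal_countBalls := by
  intro lowLimit highLimit _hdom hpre
  unfold Spec_countBalls
  exact countBalls_spec_core lowLimit highLimit hpre.1 hpre.2
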